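-- pv_equiv track=rewrite | github.com/eun-younglee/python_coding_test | this_is_ct/2nd/DFS-2.py | balanced_str
-- ===== SOURCE A (Python) =====
-- def balanced_str(p):
--     left, right = 0, 0
--     for i in range(len(p)):
--         if p[i] == "(":
--             left += 1
--         else:
--             right += 1
--         if left == right:
--             return i
--     return i
-- ===== SOURCE B (Python) =====
-- def balanced_str(p):
--     # brute force: a prefix p[:i+1] is balanced iff '(' makes up exactly half of it,
--     # so test each prefix length independently with str.count (no running balance)
--     for i in range(len(p)):
--         if 2 * p.count("(", 0, i + 1) == i + 1:
--             return i
--     return i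
-- ===== Notes on version B (the rewrite author's own statement) =====
-- stated objective: alternative
-- what changed: B replaces A's running two-counter balance with an independent per-prefix test: each prefix is balanced iff opening brackets make up exactly half of it, counted afresh per prefix with str.count.
import Mathlib
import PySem

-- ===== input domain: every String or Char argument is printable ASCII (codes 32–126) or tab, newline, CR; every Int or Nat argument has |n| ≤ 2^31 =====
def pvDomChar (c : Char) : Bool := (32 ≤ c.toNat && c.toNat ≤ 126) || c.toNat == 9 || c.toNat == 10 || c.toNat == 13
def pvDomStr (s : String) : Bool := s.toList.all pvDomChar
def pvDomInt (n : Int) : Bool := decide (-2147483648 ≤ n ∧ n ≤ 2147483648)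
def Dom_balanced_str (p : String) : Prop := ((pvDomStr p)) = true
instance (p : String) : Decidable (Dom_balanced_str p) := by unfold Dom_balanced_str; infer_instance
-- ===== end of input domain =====

-- B tests each prefix independently (twice the open-bracket count equals the prefix length, via str.count) instead of A's running two-counter balance; alternative decomposition, trades A's O(n) for O(n^2).


-- ===== PORT A =====
-- the for-loop over indices with the two running counters; on the empty string the
-- loop body never runs and Python raises UnboundLocalError (excluded by Pre_)
def balancedGoA : List Char → Int → Int → Int → Int
  | [], _, _, i => i - 1          -- 'return i' after the loop: i is the last index
  | c :: cs, left, right, i =>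
    let left' := if c = '(' then left + 1 else left
    let right' := if c = '(' then right else right + 1
    if left' = right' then i else balancedGoA cs left' right' (i + 1)

def balanced_str (p : String) : Int :=
  balancedGoA p.toList 0 0 0

-- ===== PORT B =====
-- for i in range(len(p)): if 2 * p.count("(", 0, i+1) == i+1: return i / return i
def balancedScanB (cs : List Char) (n i : Nat) : Int :=
  if _h : i < n then
    if 2 * ((cs.take (i + 1)).count '(') = i + 1 then (i : Int)
    else balancedScanB cs n (i + 1)
  else (i : Int) - 1
termination_by n - i

def balanced_str_alt (p : String) : Int :=
  balancedScanB p.toList p.toList.length 0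

-- ===== PRECONDITION & SPEC =====
-- Pre_ excludes only the empty string, on which both A and B raise UnboundLocalError.
def Pre_balanced_str (p : String) : Prop := p ≠ ""
instance (p : String) : Decidable (Pre_balanced_str p) := by unfold Pre_balanced_str; infer_instance
def pvWitness_balanced_str : String := "(()"

def Spec_balanced_str (p : String) (out : Int) : Prop := out = balanced_str_alt p
instance (p : String) (out : Int) : Decidable (Spec_balanced_str p out) := by unfold Spec_balanced_str; infer_instance

-- ===== CLAIM (what is proved, stated in full; the proofs are below) =====
def Claim_equal_balanced_str : Prop := ∀ (p : String), Dom_balanced_str p → Pre_balanced_str p → Spec_balanced_str p (balanced_str p)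

-- ===== LEMMAS AND PROOFS =====
-- A's loop over the suffix from index i, with counters equal to the '('-count of the
-- consumed prefix and its complement, computes exactly B's per-prefix scan from i.
theorem goA_eq_scanB (cs : List Char) (i : Nat) :
    balancedGoA (cs.drop i) (((cs.take i).count '(' : Nat) : Int)
      ((i : Int) - ((cs.take i).count '(' : Nat)) (i : Int)
      = balancedScanB cs cs.length i := by
  by_cases h : i < cs.length
  · have hdrop : cs.drop i = cs[i] :: cs.drop (i + 1) := List.drop_eq_getElem_cons h
    have htake : cs.take (i + 1) = cs.take i ++ [cs[i]] := by
      rw [List.take_add_one, List.getElem?_eq_getElem h]; rfl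
    have hcount : (cs.take (i + 1)).count '(' =
        (cs.take i).count '(' + (if cs[i] = '(' then 1 else 0) := by
      rw [htake, List.count_append]
      by_cases hc : cs[i] = '(' <;> simp [hc]
    rw [hdrop, balancedScanB]
    simp only [h, dif_pos]
    set L : Nat := (cs.take i).count '(' with hL
    by_cases hc : cs[i] = '('
    · simp only [balancedGoA, hc, reduceIte]
      by_cases hb : 2 * ((cs.take (i + 1)).count '(') = i + 1
      · have : ((L : Int) + 1 = (i : Int) - L) := by
          rw [hcount, if_pos hc] at hb; omega
        rw [if_pos this, if_pos hb]
      · have hne : ¬ ((L : Int) + 1 = (i : Int) - L) := by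
          rw [hcount, if_pos hc] at hb; omega
        rw [if_neg hne, if_neg hb]
        have := goA_eq_scanB cs (i + 1)
        rw [hcount, if_pos hc] at this
        convert this using 2 <;> push_cast <;> omega
    · simp only [balancedGoA, hc, reduceIte]
      by_cases hb : 2 * ((cs.take (i + 1)).count '(') = i + 1
      · have : ((L : Int) = (i : Int) - L + 1) := by
          rw [hcount, if_neg hc] at hb; omega
        rw [if_pos this, if_pos hb]
      · have hne : ¬ ((L : Int) = (i : Int) - L + 1) := by
          rw [hcount, if_neg hc] at hb; omega
        rw [if_neg hne, if_neg hb]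
        have := goA_eq_scanB cs (i + 1)
        rw [hcount, if_neg hc] at this
        convert this using 2 <;> push_cast <;> omega
  · have hdrop : cs.drop i = [] := List.drop_eq_nil_of_le (by omega)
    rw [hdrop, balancedScanB]
    simp [h, balancedGoA]
termination_by cs.length - i

-- ===== VERDICT (by name: the statement is the Claim_ definition above) =====
theorem balanced_str_spec : Claim_equal_balanced_str := by
  intro p _ _
  show balanced_str p = balanced_str_alt p
  simp only [balanced_str, balanced_str_alt]
  simpa using goA_eq_scanB p.toList 0
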